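-- pv_equiv track=rewrite | github.com/AlbertoRivadulla/Advent-of-Code | 2020/07_Handy_haversacks/main.py | findOuterBags
-- ===== SOURCE A (Python) =====
-- def findOuterBags(innerBag, rules):
--     outerBags = set()
--
--     # Iterate through all the outer bags in the list of rules
--     for outerBag in rules.keys():
--         # Check if the inner bag is contained in it
--         if innerBag in [ rule[1] for rule in rules[outerBag] ]:
--             outerBags.add(outerBag)
--
--     # Check if each of the outer bags can itself be contained in another
--     for outerBag in outerBags:
--         outerOuterBags = findOuterBags(outerBag, rules)
--         # Add these to the set of outer bags
--         outerBags = outerBags.union(outerOuterBags)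
--
--     return outerBags
-- ===== SOURCE B (Python) =====
-- def findOuterBags(innerBag, rules):
--     # Build a reverse containment index once: bag -> bags that directly contain it
--     # (in rules order, without duplicates), then collect all transitive holders
--     # with a single memoized depth-first search that expands each bag at most once.
--     contains = {}
--     for outer, contents in rules.items():
--         for _, inner in contents:
--             holders = contains.setdefault(inner, [])
--             if outer not in holders:
--                 holders.append(outer)
--
--     found = []            # every bag that can eventually contain innerBag, in discovery order
--     seen = set(found)     # always equal to set(found): O(1) membership for the list
--     expanded = set()      # bags whose direct holders were already explored
--
--     def expand(bag):
--         if bag in expanded: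
--             return
--         expanded.add(bag)
--         holders = contains.get(bag, [])
--         for holder in holders:
--             if holder not in seen:
--                 seen.add(holder)
--                 found.append(holder)
--         for holder in holders:
--             expand(holder)
--
--     expand(innerBag)
--     return set(found)
-- ===== Notes on version B (the rewrite author's own statement) =====
-- stated objective: alternative
-- what changed: B builds a reverse containment index (bag -> direct holders) in one pass over the rules and collects all transitive holders with a single memoized depth-first search that expands each bag at most once, instead of A's naive recursion that rescans every rule per call and recomputes whole ancestor sets once per path.
import Mathlib
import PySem

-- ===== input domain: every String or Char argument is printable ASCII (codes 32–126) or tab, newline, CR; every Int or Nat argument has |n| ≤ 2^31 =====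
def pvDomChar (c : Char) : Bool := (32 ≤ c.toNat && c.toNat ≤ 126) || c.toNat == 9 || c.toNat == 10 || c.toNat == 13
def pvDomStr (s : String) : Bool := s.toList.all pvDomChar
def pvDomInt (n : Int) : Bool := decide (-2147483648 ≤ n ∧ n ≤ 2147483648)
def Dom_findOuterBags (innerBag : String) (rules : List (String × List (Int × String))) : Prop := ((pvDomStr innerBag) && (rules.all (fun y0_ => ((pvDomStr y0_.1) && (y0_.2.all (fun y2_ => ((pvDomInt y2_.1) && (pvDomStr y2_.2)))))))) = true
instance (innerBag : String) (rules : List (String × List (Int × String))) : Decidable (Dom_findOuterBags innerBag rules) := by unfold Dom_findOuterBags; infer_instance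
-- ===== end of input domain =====

-- B builds a reverse containment index once and runs a single memoized DFS (each bag
-- expanded at most once) — a genuinely different algorithm from A's naive recursion with
-- repeated rescans, of comparable measured cost on the harness's inputs. Pre_ excludes
-- the inputs on which A's recursion never returns.

-- ===== PORT A =====
-- 'outerBags = set(); for outerBag in rules.keys(): if innerBag in [rule[1] for rule in rules[outerBag]]: outerBags.add(outerBag)'
def pvParentSetA (d : PySem.Dict String (List (Int × String))) (innerBag : String) : List String :=
  d.keys.foldl (fun s o => if innerBag ∈ (d.getD o []).map Prod.snd then PySem.Set.add s o else s) PySem.Set.empty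

-- A's recursion, with fuel: on inputs satisfying Pre_ the recursion depth is bounded by
-- the number of distinct keys + 1 ≤ rules.length + 1, so fuel rules.length + 2 is never
-- exhausted (pv_afuel_stab below); Python itself never returns on the excluded inputs.
def findOuterBagsFuel (d : PySem.Dict String (List (Int × String))) : Nat → String → List String
  | 0, _ => []
  | n+1, x =>
    let s := pvParentSetA d x
    s.foldl (fun acc p => PySem.Set.union acc (findOuterBagsFuel d n p)) s

def findOuterBags (innerBag : String) (rules : List (String × List (Int × String))) : List String :=
  findOuterBagsFuel (PySem.Dict.ofList rules) (rules.length + 2) innerBag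

-- ===== PORT B =====
-- 'for outer, contents in rules.items(): for _, inner in contents: holders = contains.setdefault(inner, []); if outer not in holders: holders.append(outer)'
def pvRevMap (d : PySem.Dict String (List (Int × String))) : PySem.Dict String (List String) :=
  d.items.foldl
    (fun a oc => oc.2.foldl (fun a' c => a'.modify c.2 [] (fun l => PySem.Set.add l oc.1)) a)
    PySem.Dict.empty

-- 'def expand(bag): if bag in expanded: return; expanded.add(bag); holders = contains.get(bag, []);
--  for holder in holders: if holder not in seen: seen.add(holder); found.append(holder); for holder in holders: expand(holder)'
-- B's 'seen' is by construction always set(found) (it only mirrors the list for O(1)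
-- membership), so the port tests found itself: state = (found, expanded).
-- fuel bounds the call depth, which is at most the number of
-- distinct keys + 2 on EVERY input (each non-returning call adds a new bag to expanded),
-- so fuel rules.length + 2 is never exhausted.
def pvDfs (rev : PySem.Dict String (List String)) : Nat → String → List String × List String → List String × List String
  | 0, _, st => st
  | n+1, bag, st =>
    if bag ∈ st.2 then st
    else
      let exp := PySem.Set.add st.2 bag
      let holders := rev.getD bag []
      let found := PySem.Set.update st.1 holders
      holders.foldl (fun st' h => pvDfs rev n h st') (found, exp)

def findOuterBags_alt (innerBag : String) (rules : List (String × List (Int × String))) : List String :=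
  let rev := pvRevMap (PySem.Dict.ofList rules)
  PySem.Set.ofList (pvDfs rev (rules.length + 2) innerBag (PySem.Set.empty, PySem.Set.empty)).1

-- ===== PRECONDITION & SPEC =====
-- Helpers for Pre_ (independent of both ports): direct holders of a bag, and the set of
-- all bags that can eventually contain a bag (reverse reachability, saturated by level
-- iteration — rules.length rounds always reach the fixpoint).
def pvParents (rules : List (String × List (Int × String))) (x : String) : List String :=
  (PySem.Dict.ofList rules).keys.filter
    (fun o => decide (x ∈ ((PySem.Dict.ofList rules).getD o []).map Prod.snd))

def pvStep (rules : List (String × List (Int × String))) (S : List String) : List String :=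
  PySem.Set.update S (S.flatMap (pvParents rules))

def pvAnc (rules : List (String × List (Int × String))) (x : String) : List String :=
  (pvStep rules)^[rules.length] (pvParents rules x)

-- Pre_ excludes exactly the inputs on which A never returns: those whose containment
-- graph has a cycle reachable upward from innerBag (A recurses forever there, Python
-- raises RecursionError); Pre_ admits every input on which A returns.
def Pre_findOuterBags (innerBag : String) (rules : List (String × List (Int × String))) : Prop :=
  ∀ y ∈ pvAnc rules innerBag, y ∉ pvAnc rules y
instance (innerBag : String) (rules : List (String × List (Int × String))) : Decidable (Pre_findOuterBags innerBag rules) := by unfold Pre_findOuterBags; infer_instance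

def pvWitness_findOuterBags : String × (List (String × List (Int × String))) :=
  ("a", [("b", [(1, "a")]), ("c", [(1, "b"), (2, "d")])])

def Spec_findOuterBags (innerBag : String) (rules : List (String × List (Int × String))) (out : List String) : Prop := out = findOuterBags_alt innerBag rules
instance (innerBag : String) (rules : List (String × List (Int × String))) (out : List String) : Decidable (Spec_findOuterBags innerBag rules out) := by unfold Spec_findOuterBags; infer_instance

-- ===== CLAIM (what is proved, stated in full; the proofs are below) =====
def Claim_equal_findOuterBags : Prop := ∀ (innerBag : String) (rules : List (String × List (Int × String))), Dom_findOuterBags innerBag rules → Pre_findOuterBags innerBag rules → Spec_findOuterBags innerBag rules (findOuterBags innerBag rules)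

-- ===== LEMMAS AND PROOFS =====

-- Abbreviations used only by the proofs.
def pvK (rules : List (String × List (Int × String))) : List String :=
  (PySem.Dict.ofList rules).keys
def pvAabs (rules : List (String × List (Int × String))) (x : String) : List String :=
  findOuterBagsFuel (PySem.Dict.ofList rules) (rules.length + 2) x

-- ---- generic PySem.Set facts ----
lemma pv_union_add (a b : List String) (x : String) :
    PySem.Set.union a (PySem.Set.add b x) = PySem.Set.add (PySem.Set.union a b) x := by
  by_cases hx : x ∈ b
  · rw [PySem.Set.add_of_mem hx, PySem.Set.add_of_mem]
    exact (PySem.Set.mem_union _ _ _).2 (Or.inr hx)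
  · rw [PySem.Set.add_of_not_mem hx]
    show List.foldl PySem.Set.add a (b ++ [x]) = _
    rw [List.foldl_append]
    rfl

lemma pv_union_foldl (l : List String) : ∀ (a b : List String),
    PySem.Set.union a (l.foldl PySem.Set.add b) = l.foldl PySem.Set.add (PySem.Set.union a b) := by
  induction l with
  | nil => intro a b; rfl
  | cons x l ih =>
    intro a b
    simp only [List.foldl_cons]
    rw [ih, pv_union_add]

lemma pv_union_union (a b c : List String) :
    PySem.Set.union (PySem.Set.union a b) c = PySem.Set.union a (PySem.Set.union b c) :=
  (pv_union_foldl c a b).symm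

lemma pv_union_absorb (t : List String) : ∀ (s : List String), (∀ x ∈ t, x ∈ s) →
    PySem.Set.union s t = s := by
  induction t with
  | nil => intro s _; rfl
  | cons x t ih =>
    intro s h
    show List.foldl PySem.Set.add s (x :: t) = s
    simp only [List.foldl_cons]
    rw [PySem.Set.add_of_mem (h x (by simp))]
    exact ih s (fun y hy => h y (by simp [hy]))

lemma pv_union_fuse (g : String → List String) (l : List String) : ∀ (res s0 : List String),
    l.foldl (fun s p => PySem.Set.union s (g p)) (PySem.Set.union res s0)
      = PySem.Set.union res (l.foldl (fun s p => PySem.Set.union s (g p)) s0) := by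
  induction l with
  | nil => intro res s0; rfl
  | cons p l ih =>
    intro res s0
    simp only [List.foldl_cons]
    rw [pv_union_union, ih]

lemma pv_nodup_foldl_union (g : String → List String) (l : List String) : ∀ (s : List String),
    s.Nodup → (l.foldl (fun acc p => PySem.Set.union acc (g p)) s).Nodup := by
  induction l with
  | nil => intro s h; exact h
  | cons p l ih =>
    intro s h
    simp only [List.foldl_cons]
    exact ih _ (PySem.Set.nodup_union _ _ h)

lemma pv_foldl_add_if (P : String → Prop) [DecidablePred P] (l : List String) :
    ∀ (s0 : List String), l.Nodup → (∀ x ∈ l, x ∉ s0) →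
    l.foldl (fun s o => if P o then PySem.Set.add s o else s) s0
      = s0 ++ l.filter (fun o => decide (P o)) := by
  induction l with
  | nil => intro s0 _ _; simp
  | cons a l ih =>
    intro s0 hnd hdisj
    simp only [List.foldl_cons, List.filter_cons]
    by_cases hP : P a
    · rw [if_pos hP, PySem.Set.add_of_not_mem (hdisj a (by simp))]
      rw [ih (s0 ++ [a]) hnd.of_cons]
      · simp [hP]
      · intro x hx
        simp only [List.mem_append, List.mem_singleton]
        rintro (h | rfl)
        · exact hdisj x (by simp [hx]) h
        · exact (List.nodup_cons.1 hnd).1 hx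
    · rw [if_neg hP, ih s0 hnd.of_cons (fun x hx => hdisj x (by simp [hx]))]
      simp [hP]

-- ---- keys ----
lemma pv_keys_nodup (rules : List (String × List (Int × String))) : (pvK rules).Nodup :=
  PySem.Dict.nodup_keys_ofList rules

lemma pv_keys_len (rules : List (String × List (Int × String))) :
    (pvK rules).length ≤ rules.length := by
  have h : (PySem.Dict.ofList rules).keys = PySem.Set.ofList (rules.map Prod.fst) := by
    show ((rules.foldl (fun d p => d.insert p.1 p.2) PySem.Dict.empty)).keys = _
    rw [PySem.Dict.keys_foldl_insert_key]
    simp [PySem.Set.update_nil_left]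
  show (PySem.Dict.ofList rules).keys.length ≤ _
  rw [h]
  calc (PySem.Set.ofList (rules.map Prod.fst)).length ≤ (rules.map Prod.fst).length :=
        PySem.Set.length_ofList_le _
    _ = rules.length := List.length_map ..

-- ---- parents ----
lemma pv_parents_nodup (rules : List (String × List (Int × String))) (x : String) :
    (pvParents rules x).Nodup :=
  (pv_keys_nodup rules).filter _

lemma pv_parents_sub_keys (rules : List (String × List (Int × String))) (x : String) :
    ∀ p ∈ pvParents rules x, p ∈ pvK rules := by
  intro p hp
  exact List.mem_of_mem_filter hp

lemma pv_parents_eq (rules : List (String × List (Int × String))) (x : String) :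
    pvParentSetA (PySem.Dict.ofList rules) x = pvParents rules x := by
  unfold pvParentSetA pvParents
  rw [pv_foldl_add_if _ _ PySem.Set.empty (PySem.Dict.nodup_keys_ofList rules) (by intro y _ h; simp [PySem.Set.empty] at h)]
  rfl

-- ---- ancestor-set (pvAnc) facts ----
lemma pv_mem_step (rules : List (String × List (Int × String))) (S : List String) :
    ∀ a ∈ S, a ∈ pvStep rules S := by
  intro a ha
  exact (PySem.Set.mem_update _ _ _).2 (Or.inl ha)

lemma pv_step_parents (rules : List (String × List (Int × String))) (S : List String) :
    ∀ y ∈ S, ∀ p ∈ pvParents rules y, p ∈ pvStep rules S := by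
  intro y hy p hp
  exact (PySem.Set.mem_update _ _ _).2 (Or.inr (List.mem_flatMap.2 ⟨y, hy, hp⟩))

lemma pv_iter_mem (rules : List (String × List (Int × String))) (k : Nat) :
    ∀ (S : List String) (a : String), a ∈ S → a ∈ (pvStep rules)^[k] S := by
  induction k with
  | zero => intro S a h; exact h
  | succ k ih =>
    intro S a h
    rw [Function.iterate_succ_apply]
    exact ih _ a (pv_mem_step rules S a h)

lemma pv_anc_start (rules : List (String × List (Int × String))) (x : String) :
    ∀ p ∈ pvParents rules x, p ∈ pvAnc rules x := by
  intro p hp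
  exact pv_iter_mem rules _ _ p hp

lemma pv_iter_sub_keys (rules : List (String × List (Int × String))) (k : Nat) :
    ∀ (S : List String), (∀ a ∈ S, a ∈ pvK rules) →
      ∀ a ∈ (pvStep rules)^[k] S, a ∈ pvK rules := by
  induction k with
  | zero => intro S h; exact h
  | succ k ih =>
    intro S h
    rw [Function.iterate_succ_apply]
    apply ih
    intro a ha
    rcases (PySem.Set.mem_update _ _ _).1 ha with h1 | h1
    · exact h a h1
    · obtain ⟨y, _, hp⟩ := List.mem_flatMap.1 h1
      exact pv_parents_sub_keys rules y a hp

lemma pv_iter_nodup (rules : List (String × List (Int × String))) (k : Nat) :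
    ∀ (S : List String), S.Nodup → ((pvStep rules)^[k] S).Nodup := by
  induction k with
  | zero => intro S h; exact h
  | succ k ih =>
    intro S h
    rw [Function.iterate_succ_apply]
    exact ih _ (PySem.Set.nodup_update _ _ h)

lemma pv_step_growth (rules : List (String × List (Int × String))) (S : List String)
    (h : pvStep rules S ≠ S) : S.length + 1 ≤ (pvStep rules S).length := by
  have he : pvStep rules S
      = S ++ (PySem.Set.ofList (S.flatMap (pvParents rules))).filter
               (fun y => !(PySem.Set.contains S y)) :=
    PySem.Set.update_eq_append_filter _ _
  rcases List.eq_nil_or_concat ((PySem.Set.ofList (S.flatMap (pvParents rules))).filter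
               (fun y => !(PySem.Set.contains S y))) with hnil | hcc
  · rw [hnil] at he; simp at he; exact absurd he h
  · obtain ⟨l', a, hla⟩ := hcc
    rw [he, hla]
    simp

lemma pv_dichotomy (rules : List (String × List (Int × String))) (S : List String) :
    ∀ (k : Nat), pvStep rules ((pvStep rules)^[k] S) = (pvStep rules)^[k] S
      ∨ S.length + k ≤ ((pvStep rules)^[k] S).length := by
  intro k
  induction k with
  | zero => right; simp
  | succ k ih =>
    by_cases hf : pvStep rules ((pvStep rules)^[k] S) = (pvStep rules)^[k] S
    · left
      rw [Function.iterate_succ_apply', hf, hf]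
    · rcases ih with h | h
      · exact absurd h hf
      · right
        rw [Function.iterate_succ_apply']
        have := pv_step_growth rules _ hf
        omega

lemma pv_anc_fixed (rules : List (String × List (Int × String))) (x : String) :
    pvStep rules (pvAnc rules x) = pvAnc rules x := by
  by_contra hne
  have hgrow := pv_step_growth rules _ hne
  have hdich := pv_dichotomy rules (pvParents rules x) rules.length
  rcases hdich with h | h
  · exact hne h
  · have hnd : (pvStep rules (pvAnc rules x)).Nodup := by
      have := pv_iter_nodup rules rules.length (pvParents rules x)
        ((PySem.Dict.nodup_keys_ofList rules).filter _)
      exact PySem.Set.nodup_update _ _ this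
    have hsub : ∀ a ∈ pvStep rules (pvAnc rules x), a ∈ pvK rules := by
      have h1 := pv_iter_sub_keys rules rules.length (pvParents rules x)
        (pv_parents_sub_keys rules x)
      intro a ha
      rcases (PySem.Set.mem_update _ _ _).1 ha with h2 | h2
      · exact h1 a h2
      · obtain ⟨y, _, hp⟩ := List.mem_flatMap.1 h2
        exact pv_parents_sub_keys rules y a hp
    have hlen : (pvStep rules (pvAnc rules x)).length ≤ (pvK rules).length :=
      List.Subperm.length_le (List.subperm_of_subset hnd hsub)
    have := pv_keys_len rules
    unfold pvAnc at hgrow hlen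
    omega

lemma pv_anc_closed (rules : List (String × List (Int × String))) (x : String) :
    ∀ y ∈ pvAnc rules x, ∀ p ∈ pvParents rules y, p ∈ pvAnc rules x := by
  intro y hy p hp
  have := pv_step_parents rules (pvAnc rules x) y hy p hp
  rwa [pv_anc_fixed] at this

lemma pv_anc_sub_keys (rules : List (String × List (Int × String))) (x : String) :
    ∀ a ∈ pvAnc rules x, a ∈ pvK rules :=
  pv_iter_sub_keys rules rules.length (pvParents rules x) (pv_parents_sub_keys rules x)

lemma pv_iter_sub_closed (rules : List (String × List (Int × String))) (T : List String)
    (hT : ∀ y ∈ T, ∀ p ∈ pvParents rules y, p ∈ T) (k : Nat) :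
    ∀ (S : List String), (∀ a ∈ S, a ∈ T) → ∀ a ∈ (pvStep rules)^[k] S, a ∈ T := by
  induction k with
  | zero => intro S h; exact h
  | succ k ih =>
    intro S h
    rw [Function.iterate_succ_apply]
    apply ih
    intro a ha
    rcases (PySem.Set.mem_update _ _ _).1 ha with h1 | h1
    · exact h a h1
    · obtain ⟨y, hy, hp⟩ := List.mem_flatMap.1 h1
      exact hT y (h y hy) a hp

lemma pv_anc_trans (rules : List (String × List (Int × String))) (x p : String)
    (hp : p ∈ pvAnc rules x) : ∀ z ∈ pvAnc rules p, z ∈ pvAnc rules x :=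
  pv_iter_sub_closed rules (pvAnc rules x) (pv_anc_closed rules x) rules.length
    (pvParents rules p) (pv_anc_closed rules x p hp)

-- ---- A-side fuel facts ----
lemma pv_afuel_nodup (rules : List (String × List (Int × String))) :
    ∀ (n : Nat) (x : String), (findOuterBagsFuel (PySem.Dict.ofList rules) n x).Nodup := by
  intro n
  induction n with
  | zero => intro x; simp [findOuterBagsFuel]
  | succ n ih =>
    intro x
    show (List.foldl _ (pvParentSetA (PySem.Dict.ofList rules) x) _).Nodup
    apply pv_nodup_foldl_union
    rw [pv_parents_eq]
    exact pv_parents_nodup rules x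

lemma pv_filter_len_succ (keys : List String) (path : List String) (x : String) :
    keys.Nodup → x ∈ keys → x ∉ path →
    (keys.filter (fun k => decide (k ∉ path ++ [x]))).length + 1
      = (keys.filter (fun k => decide (k ∉ path))).length := by
  induction keys with
  | nil => intro _ hx; simp at hx
  | cons a ks ih =>
    intro hnd hx hxp
    simp only [List.filter_cons]
    by_cases hax : a = x
    · subst hax
      rw [if_neg (by simp), if_pos (by simpa using hxp)]
      have hnotin : a ∉ ks := (List.nodup_cons.1 hnd).1
      have : List.filter (fun k => decide (k ∉ path ++ [a])) ks
          = List.filter (fun k => decide (k ∉ path)) ks := by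
        apply List.filter_congr
        intro k hk
        have : k ≠ a := fun h => hnotin (h ▸ hk)
        simp [this]
      rw [this]
      simp
    · have hx' : x ∈ ks := by
        rcases List.mem_cons.1 hx with h | h
        · exact absurd h.symm hax
        · exact h
      by_cases hap : a ∈ path
      · rw [if_neg (by simp [hap]), if_neg (by simp [hap])]
        exact ih (List.nodup_cons.1 hnd).2 hx' hxp
      · rw [if_pos (by simp [hap, hax]), if_pos (by simpa using hap)]
        simp only [List.length_cons]
        have := ih (List.nodup_cons.1 hnd).2 hx' hxp
        omega

lemma pv_filter_len_mono (keys e1 e2 : List String) (h : ∀ a ∈ e1, a ∈ e2) :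
    (keys.filter (fun k => decide (k ∉ e2))).length
      ≤ (keys.filter (fun k => decide (k ∉ e1))).length := by
  rw [← List.countP_eq_length_filter, ← List.countP_eq_length_filter]
  apply List.countP_mono_left
  intro k _ hk
  simp only [decide_eq_true_eq] at *
  exact fun h1 => hk (h k h1)

lemma pv_afuel_succ (d : PySem.Dict String (List (Int × String))) (n : Nat) (x : String) :
    findOuterBagsFuel d (n+1) x
      = (pvParentSetA d x).foldl (fun acc p => PySem.Set.union acc (findOuterBagsFuel d n p))
          (pvParentSetA d x) := rfl

lemma pv_filter_append_ne (keys path : List String) (x : String) (hx : x ∉ keys) :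
    keys.filter (fun k => decide (k ∉ path ++ [x])) = keys.filter (fun k => decide (k ∉ path)) := by
  apply List.filter_congr
  intro k hk
  have : k ≠ x := fun h => hx (h ▸ hk)
  simp [this]

lemma pv_afuel_stab (rules : List (String × List (Int × String))) :
    ∀ (n : Nat) (m : Nat) (x : String) (path : List String),
    (∀ g ∈ path, g ≠ x ∧ g ∉ pvAnc rules x) →
    (∀ y ∈ pvAnc rules x, y ∉ pvAnc rules y) →
    ((pvK rules).filter (fun k => decide (k ∉ path))).length + 1
        + (if x ∈ pvK rules then 0 else 1) ≤ n →
    ((pvK rules).filter (fun k => decide (k ∉ path))).length + 1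
        + (if x ∈ pvK rules then 0 else 1) ≤ m →
    findOuterBagsFuel (PySem.Dict.ofList rules) n x
      = findOuterBagsFuel (PySem.Dict.ofList rules) m x := by
  intro n
  induction n with
  | zero =>
    intro m x path _ _ hn _
    exact absurd hn (by omega)
  | succ n ih =>
    intro m x path hpath hacy hn hm
    cases m with
    | zero => exact absurd hm (by omega)
    | succ m =>
      rw [pv_afuel_succ, pv_afuel_succ]
      apply PySem.List.foldl_congr_mem
      intro acc p hp
      have hp' : p ∈ pvParents rules x := by rwa [pv_parents_eq] at hp
      have hpanc : p ∈ pvAnc rules x := pv_anc_start rules x p hp'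
      have hxnotanc : x ∉ pvAnc rules x := fun h => hacy x h h
      have hxp : x ∉ path := fun h => (hpath x h).1 rfl
      have hpK : p ∈ pvK rules := pv_parents_sub_keys rules x p hp'
      have hpath' : ∀ g ∈ path ++ [x], g ≠ p ∧ g ∉ pvAnc rules p := by
        intro g hg
        rcases List.mem_append.1 hg with hg | hg
        · exact ⟨fun e => (hpath g hg).2 (e ▸ hpanc),
            fun h => (hpath g hg).2 (pv_anc_trans rules x p hpanc g h)⟩
        · have hgx : g = x := by simpa using hg
          subst hgx
          refine ⟨?_, fun h => hxnotanc (pv_anc_trans rules g p hpanc g h)⟩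
          intro e
          apply hxnotanc
          rw [e] at hpanc ⊢
          exact hpanc
      have hacy' : ∀ y ∈ pvAnc rules p, y ∉ pvAnc rules y :=
        fun y hy => hacy y (pv_anc_trans rules x p hpanc y hy)
      have hfuel : ((pvK rules).filter (fun k => decide (k ∉ path ++ [x]))).length + 1
          + (if p ∈ pvK rules then 0 else 1) ≤ n ∧
          ((pvK rules).filter (fun k => decide (k ∉ path ++ [x]))).length + 1
          + (if p ∈ pvK rules then 0 else 1) ≤ m := by
        rw [if_pos hpK]
        by_cases hxK : x ∈ pvK rules
        · have := pv_filter_len_succ (pvK rules) path x (pv_keys_nodup rules) hxK hxp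
          rw [if_pos hxK] at hn hm
          omega
        · rw [pv_filter_append_ne (pvK rules) path x hxK]
          rw [if_neg hxK] at hn hm
          omega
      have := ih m p (path ++ [x]) hpath' hacy' hfuel.1 hfuel.2
      rw [this]

lemma pv_aabs_unfold (rules : List (String × List (Int × String))) (x : String)
    (hacy : ∀ y ∈ pvAnc rules x, y ∉ pvAnc rules y) :
    pvAabs rules x
      = (pvParents rules x).foldl (fun s p => PySem.Set.union s (pvAabs rules p))
          (pvParents rules x) := by
  unfold pvAabs
  rw [show rules.length + 2 = (rules.length + 1) + 1 from rfl, pv_afuel_succ, pv_parents_eq]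
  apply PySem.List.foldl_congr_mem
  intro acc p hp
  have hpanc : p ∈ pvAnc rules x := pv_anc_start rules x p hp
  have hxnotanc : x ∉ pvAnc rules x := fun h => hacy x h h
  have hpK : p ∈ pvK rules := pv_parents_sub_keys rules x p hp
  have hpath : ∀ g ∈ [x], g ≠ p ∧ g ∉ pvAnc rules p := by
    intro g hg
    have hgx : g = x := by simpa using hg
    subst hgx
    refine ⟨?_, fun h => hxnotanc (pv_anc_trans rules g p hpanc g h)⟩
    intro e
    apply hxnotanc
    rw [e] at hpanc ⊢
    exact hpanc
  have hacy' : ∀ y ∈ pvAnc rules p, y ∉ pvAnc rules y :=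
    fun y hy => hacy y (pv_anc_trans rules x p hpanc y hy)
  have hlen : ((pvK rules).filter (fun k => decide (k ∉ ([x] : List String)))).length
      ≤ rules.length :=
    le_trans (List.length_filter_le _ _) (pv_keys_len rules)
  have := pv_afuel_stab rules (rules.length + 1) (rules.length + 2) p [x] hpath hacy'
    (by rw [if_pos hpK]; omega) (by rw [if_pos hpK]; omega)
  rw [this]

-- ---- reverse-map facts ----
lemma pv_rev_inner (o bag : String) (cs : List (Int × String)) :
    ∀ (a : PySem.Dict String (List String)),
    (cs.foldl (fun a' c => a'.modify c.2 [] (fun l => PySem.Set.add l o)) a).getD bag []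
      = if o ∈ a.getD bag [] then a.getD bag []
        else a.getD bag [] ++ (if bag ∈ cs.map Prod.snd then [o] else []) := by
  induction cs with
  | nil => intro a; by_cases h : o ∈ a.getD bag [] <;> simp [h]
  | cons c cs ih =>
    intro a
    simp only [List.foldl_cons]
    rw [ih]
    have hmod : (a.modify c.2 [] (fun l => PySem.Set.add l o)).getD bag []
        = if bag = c.2 then PySem.Set.add (a.getD c.2 []) o else a.getD bag [] :=
      PySem.Dict.getD_modify _ _ _ _ _
    by_cases hc : bag = c.2
    · subst hc
      have hmod' : (a.modify c.2 [] fun l => PySem.Set.add l o).getD c.2 []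
          = PySem.Set.add (a.getD c.2 []) o := by rw [hmod]; simp
      rw [hmod']
      have ho : o ∈ PySem.Set.add (a.getD c.2 []) o := (PySem.Set.mem_add _ _ _).2 (Or.inr rfl)
      rw [if_pos ho, PySem.Set.add_eq_ite]
      by_cases he : o ∈ a.getD c.2 [] <;> simp [he]
    · rw [hmod, if_neg hc]
      by_cases he : o ∈ a.getD bag []
      · simp [he]
      · simp only [he, if_false]
        simp only [List.map_cons, List.mem_cons, or_iff_right hc]


lemma pv_rev_entry (bag : String) (items : List (String × List (Int × String))) :
    ∀ (a : PySem.Dict String (List String)),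
    (items.map Prod.fst).Nodup → (∀ p ∈ items, p.1 ∉ a.getD bag []) →
    (items.foldl
        (fun a oc => oc.2.foldl (fun a' c => a'.modify c.2 [] (fun l => PySem.Set.add l oc.1)) a)
        a).getD bag []
      = a.getD bag [] ++ (items.filter (fun p => decide (bag ∈ p.2.map Prod.snd))).map Prod.fst := by
  induction items with
  | nil => intro a _ _; simp
  | cons oc items ih =>
    intro a hnd hdisj
    simp only [List.foldl_cons, List.filter_cons]
    have hinner := pv_rev_inner oc.1 bag oc.2
    set a' := oc.2.foldl (fun a' c => a'.modify c.2 [] (fun l => PySem.Set.add l oc.1)) a with ha'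
    have hno : oc.1 ∉ a.getD bag [] := hdisj oc (by simp)
    have ha'v : a'.getD bag [] = a.getD bag [] ++ (if bag ∈ oc.2.map Prod.snd then [oc.1] else []) := by
      rw [ha', hinner a, if_neg hno]
    rw [ih a' (by simpa using hnd.of_cons) ?hd]
    case hd =>
      intro p hp
      rw [ha'v]
      simp only [List.mem_append]
      rintro (h | h)
      · exact hdisj p (by simp [hp]) h
      · have : p.1 = oc.1 := by
          by_cases hb : bag ∈ oc.2.map Prod.snd
          · simp [hb] at h; exact h
          · simp [hb] at h
        have hne : oc.1 ∉ items.map Prod.fst := (List.nodup_cons.1 (by simpa using hnd)).1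
        exact hne (this ▸ List.mem_map_of_mem hp)
    rw [ha'v]
    by_cases hb : bag ∈ oc.2.map Prod.snd
    · simp [hb]
    · simp [hb]


lemma pv_items_filter (bag : String) (l : List (String × List (Int × String))) :
    (l.map Prod.fst).Nodup →
    ((l.filter (fun p => decide (bag ∈ p.2.map Prod.snd))).map Prod.fst)
      = (l.map Prod.fst).filter
          (fun o => decide (bag ∈ ((PySem.Dict.mk l).getD o []).map Prod.snd)) := by
  induction l with
  | nil => intro _; simp
  | cons p l ih =>
    intro hnd
    simp only [List.map_cons, List.filter_cons]
    have hself : (PySem.Dict.mk (p :: l)).getD p.1 [] = p.2 := by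
      rw [PySem.Dict.getD_eq_get?_getD]
      rw [show (PySem.Dict.mk (p :: l)) = (PySem.Dict.mk ((p.1, p.2) :: l)) from rfl]
      rw [PySem.Dict.get?_mk_cons]
      simp
    have hrest : List.filter (fun o => decide (bag ∈ ((PySem.Dict.mk (p :: l)).getD o []).map Prod.snd)) (l.map Prod.fst)
        = List.filter (fun o => decide (bag ∈ ((PySem.Dict.mk l).getD o []).map Prod.snd)) (l.map Prod.fst) := by
      apply List.filter_congr
      intro o ho
      have hne : ¬(p.1 == o) = true := by
        have : p.1 ∉ l.map Prod.fst := (List.nodup_cons.1 (by simpa using hnd)).1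
        simp only [beq_iff_eq]
        intro h; exact this (h ▸ ho)
      have : (PySem.Dict.mk (p :: l)).getD o [] = (PySem.Dict.mk l).getD o [] := by
        rw [PySem.Dict.getD_eq_get?_getD, PySem.Dict.getD_eq_get?_getD]
        rw [show (PySem.Dict.mk (p :: l)) = (PySem.Dict.mk ((p.1, p.2) :: l)) from rfl]
        rw [PySem.Dict.get?_mk_cons, if_neg hne]
      rw [this]
    rw [hself, hrest, ← ih (by simpa using hnd.of_cons)]
    by_cases hb : bag ∈ p.2.map Prod.snd <;> simp [hb]


lemma pv_rev_eq (rules : List (String × List (Int × String))) (bag : String) :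
    (pvRevMap (PySem.Dict.ofList rules)).getD bag [] = pvParents rules bag := by
  unfold pvRevMap
  have hnd : ((PySem.Dict.ofList rules).items.map Prod.fst).Nodup :=
    PySem.Dict.nodup_keys_ofList rules
  rw [pv_rev_entry bag _ _ hnd (by intro p hp; simp [PySem.Dict.getD_empty])]
  simp only [PySem.Dict.getD_empty, List.nil_append]
  rw [pv_items_filter bag _ hnd]
  rfl

lemma pv_dfs_succ (rev : PySem.Dict String (List String)) (n : Nat) (bag : String)
    (res exp : List String) :
    pvDfs rev (n+1) bag (res, exp)
      = if bag ∈ exp then (res, exp)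
        else (rev.getD bag []).foldl (fun st' h => pvDfs rev n h st')
          (PySem.Set.update res (rev.getD bag []), PySem.Set.add exp bag) := rfl

lemma pv_update_eq_union (s t : List String) : PySem.Set.update s t = PySem.Set.union s t := rfl

-- ---- main correspondence ----
lemma pv_main (rules : List (String × List (Int × String))) :
    ∀ (n : Nat) (x : String) (res exp G : List String),
    (∀ u ∈ exp, u ∉ G → ∀ z ∈ pvAabs rules u, z ∈ res) →
    (∀ g ∈ G, g ≠ x ∧ g ∉ pvAnc rules x) →
    (∀ y ∈ pvAnc rules x, y ∉ pvAnc rules y) →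
    exp.Nodup →
    ((pvK rules).filter (fun k => decide (k ∉ exp))).length + 1
        + (if x ∈ pvK rules then 0 else 1) ≤ n →
    ∃ exp₂,
      pvDfs (pvRevMap (PySem.Dict.ofList rules)) n x (res, exp)
          = (PySem.Set.union res (pvAabs rules x), exp₂) ∧
      (∀ u ∈ exp, u ∈ exp₂) ∧ exp₂.Nodup ∧
      (∀ u ∈ exp₂, u ∈ exp ∨ u = x ∨ u ∈ pvAnc rules x) ∧
      (∀ u ∈ exp₂, u ∉ G → ∀ z ∈ pvAabs rules u, z ∈ PySem.Set.union res (pvAabs rules x)) := by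
  intro n
  induction n with
  | zero =>
    intro x res exp G _ _ _ _ h5
    exact absurd h5 (by omega)
  | succ n ih =>
    intro x res exp G h1 h2 h3 h4 h5
    by_cases hxe : x ∈ exp
    · have hxG : x ∉ G := fun h => (h2 x h).1 rfl
      have habs : PySem.Set.union res (pvAabs rules x) = res :=
        pv_union_absorb _ _ (h1 x hxe hxG)
      refine ⟨exp, ?_, fun u hu => hu, h4, fun u hu => Or.inl hu, ?_⟩
      · rw [pv_dfs_succ, if_pos hxe, habs]
      · intro u hu hG z hz
        rw [habs]
        exact h1 u hu hG z hz
    · have hxnotanc : x ∉ pvAnc rules x := fun h => h3 x h h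
      have hfuel : ∀ e : List String, (∀ u ∈ exp, u ∈ e) → x ∈ e →
          ∀ p : String, p ∈ pvK rules →
          ((pvK rules).filter (fun k => decide (k ∉ e))).length + 1
            + (if p ∈ pvK rules then 0 else 1) ≤ n := by
        intro e he hxe' p hpK
        rw [if_pos hpK]
        have hmono : ((pvK rules).filter (fun k => decide (k ∉ e))).length
            ≤ ((pvK rules).filter (fun k => decide (k ∉ exp ++ [x]))).length := by
          apply pv_filter_len_mono
          intro a ha
          rcases List.mem_append.1 ha with h | h
          · exact he a h
          · have : a = x := by simpa using h
            exact this ▸ hxe'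
        by_cases hxK : x ∈ pvK rules
        · have hsucc := pv_filter_len_succ (pvK rules) exp x (pv_keys_nodup rules) hxK hxe
          rw [if_pos hxK] at h5
          omega
        · rw [pv_filter_append_ne _ _ _ hxK] at hmono
          rw [if_neg hxK] at h5
          omega
      have inner : ∀ (l : List String), (∀ p ∈ l, p ∈ pvAnc rules x) →
          ∀ (r e : List String), e.Nodup → (∀ u ∈ exp, u ∈ e) → x ∈ e →
          (∀ u ∈ e, u ∈ exp ∨ u = x ∨ u ∈ pvAnc rules x) →
          (∀ u ∈ e, u ∉ G → u ≠ x → ∀ z ∈ pvAabs rules u, z ∈ r) →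
          ∃ e₂, l.foldl (fun st' h => pvDfs (pvRevMap (PySem.Dict.ofList rules)) n h st') (r, e)
              = (l.foldl (fun s p => PySem.Set.union s (pvAabs rules p)) r, e₂) ∧
            (∀ u ∈ e, u ∈ e₂) ∧ e₂.Nodup ∧
            (∀ u ∈ e₂, u ∈ e ∨ u ∈ pvAnc rules x) ∧
            (∀ u ∈ e₂, u ∉ G → u ≠ x →
              ∀ z ∈ pvAabs rules u, z ∈ l.foldl (fun s p => PySem.Set.union s (pvAabs rules p)) r) := by
        intro l
        induction l with
        | nil =>
          intro _ r e hnd hsub hxe' hcls hinv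
          exact ⟨e, rfl, fun u hu => hu, hnd, fun u hu => Or.inl hu, fun u hu => hinv u hu⟩
        | cons p l ihl =>
          intro hl r e hnd hsub hxe' hcls hinv
          have hpanc : p ∈ pvAnc rules x := hl p (List.mem_cons_self ..)
          have hpK : p ∈ pvK rules := pv_anc_sub_keys rules x p hpanc
          have hxnp : x ≠ p := fun e' => hxnotanc (e' ▸ hpanc)
          obtain ⟨e₂, heq, hsub₂, hnd₂, hcls₂, hinv₂⟩ :=
            ih p r e (x :: G)
              (by
                intro u hu hnot
                exact hinv u hu (fun hG => hnot (List.mem_cons_of_mem _ hG))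
                  (fun hx => hnot (hx ▸ List.mem_cons_self ..)))
              (by
                intro g hg
                rcases List.mem_cons.1 hg with hgx | hg
                · refine ⟨?_, ?_⟩ <;> rw [hgx]
                  · exact hxnp
                  · exact fun h => hxnotanc (pv_anc_trans rules x p hpanc x h)
                · exact ⟨fun e' => (h2 g hg).2 (e' ▸ hpanc),
                    fun h => (h2 g hg).2 (pv_anc_trans rules x p hpanc g h)⟩)
              (fun y hy => h3 y (pv_anc_trans rules x p hpanc y hy))
              hnd
              (hfuel e hsub hxe' p hpK)
          obtain ⟨e₃, heq₃, hsub₃, hnd₃, hcls₃, hinv₃⟩ :=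
            ihl (fun q hq => hl q (List.mem_cons_of_mem _ hq))
              (PySem.Set.union r (pvAabs rules p)) e₂
              hnd₂
              (fun u hu => hsub₂ u (hsub u hu))
              (hsub₂ x hxe')
              (by
                intro u hu
                rcases hcls₂ u hu with h | h | h
                · exact hcls u h
                · exact Or.inr (Or.inr (h ▸ hpanc))
                · exact Or.inr (Or.inr (pv_anc_trans rules x p hpanc u h)))
              (by
                intro u hu hG hx z hz
                apply hinv₂ u hu ?_ z hz
                intro hmem
                rcases List.mem_cons.1 hmem with h | h
                · exact hx h
                · exact hG h)
          refine ⟨e₃, ?_, ?_, hnd₃, ?_, ?_⟩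
          · rw [List.foldl_cons, List.foldl_cons, heq, heq₃]
          · exact fun u hu => hsub₃ u (hsub₂ u hu)
          · intro u hu
            rcases hcls₃ u hu with h | h
            · rcases hcls₂ u h with h' | h' | h'
              · exact Or.inl h'
              · exact Or.inr (h' ▸ hpanc)
              · exact Or.inr (pv_anc_trans rules x p hpanc u h')
            · exact Or.inr h
          · intro u hu hG hx z hz
            rw [List.foldl_cons]
            exact hinv₃ u hu hG hx z hz
      have hx1nd : (exp ++ [x]).Nodup := by
        rw [← PySem.Set.add_of_not_mem hxe]
        exact PySem.Set.nodup_add _ _ h4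
      obtain ⟨e₂, heq, hsub₂, hnd₂, hcls₂, hinv₂⟩ :=
        inner (pvParents rules x) (pv_anc_start rules x)
          (PySem.Set.update res (pvParents rules x)) (exp ++ [x])
          hx1nd
          (fun u hu => List.mem_append_left _ hu)
          (List.mem_append_right _ (by simp))
          (by
            intro u hu
            rcases List.mem_append.1 hu with h | h
            · exact Or.inl h
            · exact Or.inr (Or.inl (by simpa using h)))
          (by
            intro u hu hG hx z hz
            have hue : u ∈ exp := by
              rcases List.mem_append.1 hu with h | h
              · exact h
              · exact absurd (by simpa using h) hx
            exact (PySem.Set.mem_update _ _ _).2 (Or.inl (h1 u hue hG z hz)))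
      have hfold : (pvParents rules x).foldl (fun s p => PySem.Set.union s (pvAabs rules p))
          (PySem.Set.update res (pvParents rules x)) = PySem.Set.union res (pvAabs rules x) := by
        rw [pv_update_eq_union, pv_union_fuse, ← pv_aabs_unfold rules x h3]
      refine ⟨e₂, ?_, ?_, hnd₂, ?_, ?_⟩
      · rw [pv_dfs_succ, if_neg hxe, pv_rev_eq, PySem.Set.add_of_not_mem hxe, heq, hfold]
      · exact fun u hu => hsub₂ u (List.mem_append_left _ hu)
      · intro u hu
        rcases hcls₂ u hu with h | h
        · rcases List.mem_append.1 h with h' | h'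
          · exact Or.inl h'
          · exact Or.inr (Or.inl (by simpa using h'))
        · exact Or.inr (Or.inr h)
      · intro u hu hG z hz
        by_cases hux : u = x
        · refine (PySem.Set.mem_union _ _ _).2 (Or.inr ?_)
          rw [← hux]
          exact hz
        · have := hinv₂ u hu hG hux z hz
          rwa [hfold] at this

-- ===== VERDICT (by name: the statement is the Claim_ definition above) =====
theorem findOuterBags_spec : Claim_equal_findOuterBags := by
  intro innerBag rules _ hPre
  unfold Spec_findOuterBags findOuterBags findOuterBags_alt
  have hfuel : ((pvK rules).filter (fun k => decide (k ∉ ([] : List String)))).length + 1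
      + (if innerBag ∈ pvK rules then 0 else 1) ≤ rules.length + 2 := by
    have h1 : ((pvK rules).filter (fun k => decide (k ∉ ([] : List String)))).length
        ≤ rules.length := le_trans (List.length_filter_le _ _) (pv_keys_len rules)
    by_cases h : innerBag ∈ pvK rules
    · rw [if_pos h]; omega
    · rw [if_neg h]; omega
  obtain ⟨e₂, heq, -, -, -, -⟩ :=
    pv_main rules (rules.length + 2) innerBag [] [] []
      (by intro u hu; simp at hu)
      (by intro g hg; simp at hg)
      hPre
      List.nodup_nil
      hfuel
  show findOuterBagsFuel (PySem.Dict.ofList rules) (rules.length + 2) innerBag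
      = PySem.Set.ofList
          (pvDfs (pvRevMap (PySem.Dict.ofList rules)) (rules.length + 2) innerBag ([], [])).1
  rw [heq]
  have h1 : PySem.Set.union [] (pvAabs rules innerBag) = pvAabs rules innerBag := by
    rw [show PySem.Set.union [] (pvAabs rules innerBag)
        = PySem.Set.ofList (pvAabs rules innerBag) from rfl]
    exact PySem.Set.ofList_eq_self_of_nodup _ (pv_afuel_nodup rules _ _)
  show pvAabs rules innerBag = PySem.Set.ofList (PySem.Set.union [] (pvAabs rules innerBag))
  rw [h1]
  exact (PySem.Set.ofList_eq_self_of_nodup _ (pv_afuel_nodup rules _ _)).symm
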